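-- pv_equiv track=rewrite | github.com/JeromeF91/ChineseSwitchParser | switch_models/vm_s100_0800ms.py | _parse_vlan_assignments
-- ===== SOURCE A (Python) =====
-- def _parse_vlan_assignments(vlan_string: str) -> tuple:
--     """Parse VLAN assignment string into tagged and untagged lists."""
--     tagged = []
--     untagged = []
--
--     if not vlan_string:
--         return tagged, untagged
--
--     # Parse format like "1UP, 99T, 105T, 106T, 110T, 120T, 130T, 140T, 150T, 160T, 170T, 180T, 190T"
--     for vlan_entry in vlan_string.split(', '):
--         vlan_entry = vlan_entry.strip()
--         if vlan_entry.endswith('T'):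
--             # Tagged VLAN
--             vlan_id = vlan_entry[:-1]
--             if vlan_id.isdigit():
--                 tagged.append(vlan_id)
--         elif vlan_entry.endswith('UP') or vlan_entry.endswith('FP'):
--             # Untagged VLAN (UP = untagged port, FP = forbidden port)
--             vlan_id = vlan_entry[:-2]
--             if vlan_id.isdigit():
--                 untagged.append(vlan_id)
--         elif vlan_entry.endswith('F'):
--             # Forbidden VLAN
--             vlan_id = vlan_entry[:-1]
--             if vlan_id.isdigit():
--                 untagged.append(vlan_id)
--
--     return tagged, untagged
-- ===== SOURCE B (Python) =====
-- ROUTE = {'T': 'tagged', 'UP': 'untagged', 'FP': 'untagged', 'F': 'untagged'}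
--
--
-- def _classify(entry):
--     """Split one entry into its trailing letter code and leading id, and route it."""
--     e = entry.strip()
--     vid = e.rstrip('TUPF')
--     if not vid.isdigit():
--         return vid, None
--     return vid, ROUTE.get(e[len(vid):])
--
--
-- def _parse_vlan_assignments(vlan_string: str) -> tuple:
--     """Parse VLAN assignment string into tagged and untagged lists.
--
--     Staged: first parse every entry into (id, route) once, then partition
--     the parsed list with two comprehensions."""
--     if not vlan_string:
--         return [], []
--     parsed = [_classify(e) for e in vlan_string.split(', ')]
--     return ([v for v, r in parsed if r == 'tagged'],
--             [v for v, r in parsed if r == 'untagged'])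
-- ===== Notes on version B (the rewrite author's own statement) =====
-- stated objective: alternative
-- what changed: Replaces A's single-pass accumulator with suffix-cascade (endswith/slice/isdigit per branch) by a staged pipeline: each entry is parsed exactly once into an (id, route) pair by rstripping the trailing letter-code run, then the parsed list is partitioned by two comprehensions.
import Mathlib
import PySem

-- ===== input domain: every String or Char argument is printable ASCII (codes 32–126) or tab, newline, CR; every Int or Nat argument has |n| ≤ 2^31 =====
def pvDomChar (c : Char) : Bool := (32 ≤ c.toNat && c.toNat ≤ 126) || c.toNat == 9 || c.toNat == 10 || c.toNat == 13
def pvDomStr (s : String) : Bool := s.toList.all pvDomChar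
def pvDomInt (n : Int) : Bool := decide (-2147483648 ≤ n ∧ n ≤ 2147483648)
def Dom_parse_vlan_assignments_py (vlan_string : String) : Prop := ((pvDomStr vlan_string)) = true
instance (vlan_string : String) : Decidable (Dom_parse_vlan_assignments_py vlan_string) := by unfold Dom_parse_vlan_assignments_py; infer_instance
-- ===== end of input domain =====

-- B replaces A's single-pass suffix-cascade accumulator by a staged pipeline (parse every entry once into an (id, route) pair via rstrip of the letter codes, then partition with two comprehensions); same O(n) cost.

-- ===== PORT A =====
-- loop body of A's for-loop (state = (tagged, untagged))
def pvStepA (st : List String × List String) (entry : List Char) : List String × List String :=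
  let v := PySem.Chars.strip entry
  if PySem.Chars.endswith v ['T'] then
    let vid := PySem.Chars.slice v none (some (-1))
    if PySem.Chars.strIsdigit vid then (st.1 ++ [String.ofList vid], st.2) else st
  else if PySem.Chars.endswith v ['U','P'] || PySem.Chars.endswith v ['F','P'] then
    let vid := PySem.Chars.slice v none (some (-2))
    if PySem.Chars.strIsdigit vid then (st.1, st.2 ++ [String.ofList vid]) else st
  else if PySem.Chars.endswith v ['F'] then
    let vid := PySem.Chars.slice v none (some (-1))
    if PySem.Chars.strIsdigit vid then (st.1, st.2 ++ [String.ofList vid]) else st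
  else st

def parse_vlan_assignments_py (vlan_string : String) : List String × List String :=
  if vlan_string = "" then ([], [])
  else (PySem.Chars.splitOn vlan_string.toList (", ".toList)).foldl pvStepA ([], [])

-- ===== PORT B =====
-- the rstrip('TUPF') character set
def pvTUPF (c : Char) : Bool := c == 'T' || c == 'U' || c == 'P' || c == 'F'

-- port of B's _classify: strip, e.rstrip('TUPF') (exact: str.rstrip(chars) removes the
-- maximal trailing run of characters of the set, = List.rdropWhile), then route the suffix
def pvClassify (entry : List Char) : String × Option String :=
  let e := PySem.Chars.strip entry
  let vid := e.rdropWhile pvTUPF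
  if !(PySem.Chars.strIsdigit vid) then (String.ofList vid, none)
  else
    let rest := e.drop vid.length     -- e[len(vid):]
    (String.ofList vid,
      if rest = ['T'] then some "tagged"
      else if rest = ['U','P'] ∨ rest = ['F','P'] ∨ rest = ['F'] then some "untagged"
      else none)

def parse_vlan_assignments_py_alt (vlan_string : String) : List String × List String :=
  if vlan_string = "" then ([], [])
  else
    let parsed := (PySem.Chars.splitOn vlan_string.toList (", ".toList)).map pvClassify
    (parsed.filterMap (fun p => if p.2 = some "tagged" then some p.1 else none),
     parsed.filterMap (fun p => if p.2 = some "untagged" then some p.1 else none))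

-- ===== PRECONDITION & SPEC =====
def Spec_parse_vlan_assignments_py (vlan_string : String) (out : List String × List String) : Prop := out = parse_vlan_assignments_py_alt vlan_string
instance (vlan_string : String) (out : List String × List String) : Decidable (Spec_parse_vlan_assignments_py vlan_string out) := by unfold Spec_parse_vlan_assignments_py; infer_instance

-- ===== CLAIM (what is proved, stated in full; the proofs are below) =====
def Claim_equal_parse_vlan_assignments_py : Prop := ∀ (vlan_string : String), Dom_parse_vlan_assignments_py vlan_string → Spec_parse_vlan_assignments_py vlan_string (parse_vlan_assignments_py vlan_string)

-- ===== LEMMAS AND PROOFS =====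
set_option maxRecDepth 4000

-- dropWhile/takeWhile of (q ++ c :: t) when q is all-p and c is not
lemma pv_tw_dw (p : Char → Bool) (q : List Char) (c : Char) (t : List Char)
    (hq : ∀ x ∈ q, p x = true) (hc : p c = false) :
    (q ++ c :: t).takeWhile p = q ∧ (q ++ c :: t).dropWhile p = c :: t := by
  induction q with
  | nil => simp [hc]
  | cons a q ih =>
    have ha : p a = true := hq a (by simp)
    have := ih (fun x hx => hq x (by simp [hx]))
    simp [ha, this.1, this.2]

-- rdropWhile/drop-decomposition of (q' ++ [c] ++ s) when s is all-p and c is not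
lemma pv_rdrop (p : Char → Bool) (q' : List Char) (c : Char) (s : List Char)
    (hs : ∀ x ∈ s, p x = true) (hc : p c = false) :
    ((q' ++ [c]) ++ s).rdropWhile p = q' ++ [c] := by
  have h1 : ((q' ++ [c]) ++ s).reverse = s.reverse ++ c :: q'.reverse := by
    simp [List.reverse_append]
  have h2 := (pv_tw_dw p s.reverse c q'.reverse
    (fun x hx => hs x (by simpa using hx)) hc).2
  simp only [List.rdropWhile, h1, h2]
  simp

lemma pv_digit_not_tupf (c : Char) (h : PySem.Chars.isdigit c = true) : pvTUPF c = false := by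
  by_cases hc : pvTUPF c = true
  · rcases (by simpa only [pvTUPF, Bool.or_eq_true, beq_iff_eq, or_assoc] using hc :
      c = 'T' ∨ c = 'U' ∨ c = 'P' ∨ c = 'F') with rfl | rfl | rfl | rfl <;>
      exact absurd h (by decide)
  · simpa using hc

-- if v = q ++ s with q a nonempty all-digit run and s all-TUPF, the rstrip finds exactly q
lemma pv_rdrop_digits (v q s : List Char) (h : v = q ++ s)
    (hq : PySem.Chars.strIsdigit q = true) (hs : ∀ x ∈ s, pvTUPF x = true) :
    v.rdropWhile pvTUPF = q := by
  have hq' := (by simpa only [PySem.Chars.strIsdigit, Bool.and_eq_true, Bool.not_eq_true',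
    List.isEmpty_eq_false_iff, List.all_eq_true] using hq :
    q ≠ [] ∧ ∀ x ∈ q, PySem.Chars.isdigit x = true)
  obtain ⟨q', c, rfl⟩ : ∃ q' c, q = q' ++ [c] :=
    ⟨q.dropLast, q.getLast hq'.1, (List.dropLast_append_getLast hq'.1).symm⟩
  have hc : pvTUPF c = false := pv_digit_not_tupf c (hq'.2 c (by simp))
  rw [h]
  exact pv_rdrop pvTUPF q' c s hs hc

lemma pv_last_eq {α : Type} (r s : List α) (a b : α) (h : r ++ [a] = s ++ [b]) : a = b := by
  have := congrArg List.getLast? h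
  simpa using this

-- proof-only views of the two per-entry computations on the already-stripped entry
def pvACore (st : List String × List String) (v : List Char) : List String × List String :=
  if PySem.Chars.endswith v ['T'] then
    (if PySem.Chars.strIsdigit v.dropLast then (st.1 ++ [String.ofList v.dropLast], st.2) else st)
  else if PySem.Chars.endswith v ['U','P'] || PySem.Chars.endswith v ['F','P'] then
    (if PySem.Chars.strIsdigit (v.take (v.length - 2)) then (st.1, st.2 ++ [String.ofList (v.take (v.length - 2))]) else st)
  else if PySem.Chars.endswith v ['F'] then
    (if PySem.Chars.strIsdigit v.dropLast then (st.1, st.2 ++ [String.ofList v.dropLast]) else st)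
  else st

def pvBCoreC (v : List Char) : String × Option String :=
  let vid := v.rdropWhile pvTUPF
  if !(PySem.Chars.strIsdigit vid) then (String.ofList vid, none)
  else
    let rest := v.drop vid.length
    (String.ofList vid,
      if rest = ['T'] then some "tagged"
      else if rest = ['U','P'] ∨ rest = ['F','P'] ∨ rest = ['F'] then some "untagged"
      else none)

lemma pv_stepA_core (st : List String × List String) (e : List Char) :
    pvStepA st e = pvACore st (PySem.Chars.strip e) := by
  simp only [pvStepA, pvACore, PySem.Chars.slice_eq_listSlice, PySem.List.slice_to_neg_one,
    PySem.List.slice_to_neg_ofNat (PySem.Chars.strip e) 2 (by omega)]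

lemma pv_classify_core (e : List Char) : pvClassify e = pvBCoreC (PySem.Chars.strip e) := rfl

-- when each branch's digit test is doomed, A's cascade leaves the state alone
lemma pvA_skip (st : List String × List String) (v : List Char)
    (hT : PySem.Chars.endswith v ['T'] = true → PySem.Chars.strIsdigit v.dropLast = false)
    (hUP : PySem.Chars.endswith v ['U','P'] = true → PySem.Chars.strIsdigit (v.take (v.length - 2)) = false)
    (hFP : PySem.Chars.endswith v ['F','P'] = true → PySem.Chars.strIsdigit (v.take (v.length - 2)) = false)
    (hF : PySem.Chars.endswith v ['F'] = true → PySem.Chars.strIsdigit v.dropLast = false) :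
    pvACore st v = st := by
  unfold pvACore
  by_cases h1 : PySem.Chars.endswith v ['T'] = true
  · simp [h1, hT h1]
  · simp only [Bool.not_eq_true] at h1
    by_cases h2 : PySem.Chars.endswith v ['U','P'] = true
    · simp [h1, h2, hUP h2]
    · simp only [Bool.not_eq_true] at h2
      by_cases h3 : PySem.Chars.endswith v ['F','P'] = true
      · simp [h1, h2, h3, hFP h3]
      · simp only [Bool.not_eq_true] at h3
        by_cases h4 : PySem.Chars.endswith v ['F'] = true
        · simp [h1, h2, h3, h4, hF h4]
        · simp only [Bool.not_eq_true] at h4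
          simp [h1, h2, h3, h4]

-- A's branch data forces B's parse: prefix = rstrip result, suffix = the remainder
lemma pv_force (v q s : List Char) (h : v = q ++ s)
    (hq : PySem.Chars.strIsdigit q = true) (hs : ∀ x ∈ s, pvTUPF x = true) :
    v.rdropWhile pvTUPF = q ∧ v.rtakeWhile pvTUPF = s := by
  have h1 := pv_rdrop_digits v q s h hq hs
  refine ⟨h1, ?_⟩
  have h2 := List.rdropWhile_append_rtakeWhile (p := pvTUPF) (l := v)
  rw [h1] at h2
  exact List.append_cancel_left (h2.trans h)

-- the per-entry equivalence on the stripped entry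
lemma pv_core (st : List String × List String) (v : List Char) :
    pvACore st v =
      (st.1 ++ (if (pvBCoreC v).2 = some "tagged" then [(pvBCoreC v).1] else []),
       st.2 ++ (if (pvBCoreC v).2 = some "untagged" then [(pvBCoreC v).1] else [])) := by
  obtain ⟨q, hq⟩ : ∃ q, List.rdropWhile pvTUPF v = q := ⟨_, rfl⟩
  obtain ⟨r, hr⟩ : ∃ r, List.rtakeWhile pvTUPF v = r := ⟨_, rfl⟩
  have hsplit : q ++ r = v := by rw [← hq, ← hr]; exact List.rdropWhile_append_rtakeWhile
  have hdrop : v.drop q.length = r := by rw [← hsplit]; simp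
  by_cases hd : PySem.Chars.strIsdigit q = true
  · -- the id part is a nonempty digit run
    by_cases h1 : r = ['T']
    · have hv : v = q ++ ['T'] := by rw [← hsplit, h1]
      have hend : PySem.Chars.endswith v ['T'] = true :=
        (PySem.Chars.endswith_iff _ _).mpr ⟨q, hv.symm⟩
      have hdl : v.dropLast = q := by rw [hv]; simp
      unfold pvACore pvBCoreC
      simp [hend, hdl, hd, hq, hdrop, h1]
    · by_cases h2 : r = ['U','P'] ∨ r = ['F','P']
      · obtain ⟨x, hv⟩ : ∃ x, v = q ++ [x, 'P'] := by
          rcases h2 with h | h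
          · exact ⟨'U', by rw [← hsplit, h]⟩
          · exact ⟨'F', by rw [← hsplit, h]⟩
        have hTf : PySem.Chars.endswith v ['T'] = false := by
          rw [Bool.eq_false_iff]; intro h
          obtain ⟨w, hw⟩ := (PySem.Chars.endswith_iff _ _).mp h
          have hTP : 'T' = 'P' := pv_last_eq w (q ++ [x]) _ _ (by rw [hw, hv]; simp)
          simp at hTP
        have htk : v.take (v.length - 2) = q := by
          rw [hv]; simp [List.length_append]
        have hOr : (PySem.Chars.endswith v ['U','P'] || PySem.Chars.endswith v ['F','P']) = true := by
          rcases h2 with h | h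
          · exact Bool.or_eq_true_iff.mpr (Or.inl ((PySem.Chars.endswith_iff _ _).mpr
              ⟨q, by rw [← h, hsplit]⟩))
          · exact Bool.or_eq_true_iff.mpr (Or.inr ((PySem.Chars.endswith_iff _ _).mpr
              ⟨q, by rw [← h, hsplit]⟩))
        unfold pvACore pvBCoreC
        rcases h2 with h | h <;>
          simp [hTf, hOr, htk, hd, hq, hdrop, h]
      · by_cases h3 : r = ['F']
        · have hv : v = q ++ ['F'] := by rw [← hsplit, h3]
          have hTf : PySem.Chars.endswith v ['T'] = false := by
            rw [Bool.eq_false_iff]; intro h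
            obtain ⟨w, hw⟩ := (PySem.Chars.endswith_iff _ _).mp h
            have hTF : 'T' = 'F' := pv_last_eq w q _ _ (by rw [hw, hv])
            simp at hTF
          have hUPf : PySem.Chars.endswith v ['U','P'] = false := by
            rw [Bool.eq_false_iff]; intro h
            obtain ⟨w, hw⟩ := (PySem.Chars.endswith_iff _ _).mp h
            have hPF : 'P' = 'F' := pv_last_eq (w ++ ['U']) q _ _ (by rw [← hv, ← hw]; simp)
            simp at hPF
          have hFPf : PySem.Chars.endswith v ['F','P'] = false := by
            rw [Bool.eq_false_iff]; intro h
            obtain ⟨w, hw⟩ := (PySem.Chars.endswith_iff _ _).mp h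
            have hPF : 'P' = 'F' := pv_last_eq (w ++ ['F']) q _ _ (by rw [← hv, ← hw]; simp)
            simp at hPF
          have hFt : PySem.Chars.endswith v ['F'] = true :=
            (PySem.Chars.endswith_iff _ _).mpr ⟨q, hv.symm⟩
          have hdl : v.dropLast = q := by rw [hv]; simp
          unfold pvACore pvBCoreC
          simp [hTf, hUPf, hFPf, hFt, hdl, hd, hq, hdrop, h3]
        · -- unrecognised suffix: A skips every branch, B routes none
          have hA : pvACore st v = st := by
            apply pvA_skip
            · intro h
              obtain ⟨w, hw⟩ := (PySem.Chars.endswith_iff _ _).mp h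
              have hdl : v.dropLast = w := by rw [← hw]; simp
              rw [hdl, Bool.eq_false_iff]; intro hdig
              exact h1 (hr.symm.trans (pv_force v w ['T'] hw.symm hdig (by intro x hx; fin_cases hx <;> rfl)).2)
            · intro h
              obtain ⟨w, hw⟩ := (PySem.Chars.endswith_iff _ _).mp h
              have hdl : v.take (v.length - 2) = w := by
                rw [← hw]; simp [List.length_append]
              rw [hdl, Bool.eq_false_iff]; intro hdig
              exact h2 (Or.inl (hr.symm.trans (pv_force v w ['U','P'] hw.symm hdig (by intro x hx; fin_cases hx <;> rfl)).2))
            · intro h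
              obtain ⟨w, hw⟩ := (PySem.Chars.endswith_iff _ _).mp h
              have hdl : v.take (v.length - 2) = w := by
                rw [← hw]; simp [List.length_append]
              rw [hdl, Bool.eq_false_iff]; intro hdig
              exact h2 (Or.inr (hr.symm.trans (pv_force v w ['F','P'] hw.symm hdig (by intro x hx; fin_cases hx <;> rfl)).2))
            · intro h
              obtain ⟨w, hw⟩ := (PySem.Chars.endswith_iff _ _).mp h
              have hdl : v.dropLast = w := by rw [← hw]; simp
              rw [hdl, Bool.eq_false_iff]; intro hdig
              exact h3 (hr.symm.trans (pv_force v w ['F'] hw.symm hdig (by intro x hx; fin_cases hx <;> rfl)).2)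
          rw [hA]
          unfold pvBCoreC
          simp [hd, hq, hdrop, h1, h2, h3]
  · -- the id part is not a digit run: A skips every branch, B routes none
    have hA : pvACore st v = st := by
      apply pvA_skip
      · intro h
        obtain ⟨w, hw⟩ := (PySem.Chars.endswith_iff _ _).mp h
        have hdl : v.dropLast = w := by rw [← hw]; simp
        rw [hdl, Bool.eq_false_iff]; intro hdig
        have hqw : q = w := hq.symm.trans (pv_force v w ['T'] hw.symm hdig (by intro x hx; fin_cases hx <;> rfl)).1
        exact hd (hqw ▸ hdig)
      · intro h
        obtain ⟨w, hw⟩ := (PySem.Chars.endswith_iff _ _).mp h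
        have hdl : v.take (v.length - 2) = w := by
          rw [← hw]; simp [List.length_append]
        rw [hdl, Bool.eq_false_iff]; intro hdig
        have hqw : q = w := hq.symm.trans (pv_force v w ['U','P'] hw.symm hdig (by intro x hx; fin_cases hx <;> rfl)).1
        exact hd (hqw ▸ hdig)
      · intro h
        obtain ⟨w, hw⟩ := (PySem.Chars.endswith_iff _ _).mp h
        have hdl : v.take (v.length - 2) = w := by
          rw [← hw]; simp [List.length_append]
        rw [hdl, Bool.eq_false_iff]; intro hdig
        have hqw : q = w := hq.symm.trans (pv_force v w ['F','P'] hw.symm hdig (by intro x hx; fin_cases hx <;> rfl)).1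
        exact hd (hqw ▸ hdig)
      · intro h
        obtain ⟨w, hw⟩ := (PySem.Chars.endswith_iff _ _).mp h
        have hdl : v.dropLast = w := by rw [← hw]; simp
        rw [hdl, Bool.eq_false_iff]; intro hdig
        have hqw : q = w := hq.symm.trans (pv_force v w ['F'] hw.symm hdig (by intro x hx; fin_cases hx <;> rfl)).1
        exact hd (hqw ▸ hdig)
    rw [hA]
    unfold pvBCoreC
    simp [hd, hq]

-- per-entry: A's loop body appends exactly what B's classify routes
lemma pv_step_eq (st : List String × List String) (e : List Char) :
    pvStepA st e =
      (st.1 ++ (if (pvClassify e).2 = some "tagged" then [(pvClassify e).1] else []),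
       st.2 ++ (if (pvClassify e).2 = some "untagged" then [(pvClassify e).1] else [])) := by
  rw [pv_stepA_core, pv_classify_core, pv_core]

-- A's fold = B's staged map-then-partition
theorem pv_fold_eq (l : List (List Char)) (st : List String × List String) :
    l.foldl pvStepA st =
      (st.1 ++ (l.map pvClassify).filterMap (fun p => if p.2 = some "tagged" then some p.1 else none),
       st.2 ++ (l.map pvClassify).filterMap (fun p => if p.2 = some "untagged" then some p.1 else none)) := by
  induction l generalizing st with
  | nil => simp
  | cons e l ih =>
    rw [List.foldl_cons, ih, pv_step_eq]
    simp only [List.map_cons, List.filterMap_cons]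
    by_cases h1 : (pvClassify e).2 = some "tagged" <;>
      by_cases h2 : (pvClassify e).2 = some "untagged" <;>
        simp_all [List.append_assoc]

-- ===== VERDICT (by name: the statement is the Claim_ definition above) =====
theorem parse_vlan_assignments_py_spec : Claim_equal_parse_vlan_assignments_py := by
  intro s _
  unfold Spec_parse_vlan_assignments_py parse_vlan_assignments_py parse_vlan_assignments_py_alt
  split
  · rfl
  · rw [pv_fold_eq]; rfl
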